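-- pv_equiv track=rewrite | github.com/drewjgray5/Tradingbot | schwab_skill/watchlist_loader.py | prefilter_watchlist
-- ===== SOURCE A (Python) =====
-- LIQUID_ETF_HINTS = {"SPY", "QQQ", "IWM", "DIA", "XLK", "XLF", "XLE", "XLV", "XLY", "XLP", "XLI", "XLB", "XLU", "XLC", "XLRE"}
--
-- def prefilter_watchlist(
--     tickers: list[str],
--     max_tickers: int = 800,
--     include_etf_hints: bool = True,
-- ) -> list[str]:
--     """
--     Deterministic quality prefilter to reduce noisy universe size.
--     Keeps plain symbols first, optionally preserving a small set of liquid ETF hints.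
--     """
--     cleaned = [t.strip().upper() for t in tickers if t and t.strip()]
--     deduped = list(dict.fromkeys(cleaned))
--
--     plain = [t for t in deduped if t.isalpha() and 1 <= len(t) <= 5]
--     extras = []
--     if include_etf_hints:
--         extras = [t for t in deduped if t in LIQUID_ETF_HINTS and t not in plain]
--
--     merged = plain + extras
--     if max_tickers > 0:
--         merged = merged[:max_tickers]
--     return merged
-- ===== SOURCE B (Python) =====
-- LIQUID_ETF_HINTS = {"SPY", "QQQ", "IWM", "DIA", "XLK", "XLF", "XLE", "XLV", "XLY", "XLP", "XLI", "XLB", "XLU", "XLC", "XLRE"}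
--
-- def prefilter_watchlist(
--     tickers: list[str],
--     max_tickers: int = 800,
--     include_etf_hints: bool = True,
-- ) -> list[str]:
--     # Single fused pass: clean, dedupe (first-seen), filter and truncate in one loop.
--     # The ETF-hint branch of the original is dead code (every hint already passes the
--     # plain filter), so no second stage is needed.
--     seen = set()
--     result = []
--     for t in tickers:
--         if not t or not t.strip():
--             continue
--         s = t.strip().upper()
--         if s in seen:
--             continue
--         seen.add(s)
--         if s.isalpha() and 1 <= len(s) <= 5:
--             result.append(s)
--             if max_tickers > 0 and len(result) == max_tickers:
--                 break
--     return result
-- ===== Notes on version B (the rewrite author's own statement) =====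
-- stated objective: simpler
-- what changed: Fused A's four staged passes (clean list, dict.fromkeys dedupe, filter pass, optional ETF-hint scan with a quadratic `t not in plain` membership test, slice truncation) into one loop with a seen-set and early stop, dropping the ETF branch which is provably dead (every hint already passes the plain filter).
import Mathlib
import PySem

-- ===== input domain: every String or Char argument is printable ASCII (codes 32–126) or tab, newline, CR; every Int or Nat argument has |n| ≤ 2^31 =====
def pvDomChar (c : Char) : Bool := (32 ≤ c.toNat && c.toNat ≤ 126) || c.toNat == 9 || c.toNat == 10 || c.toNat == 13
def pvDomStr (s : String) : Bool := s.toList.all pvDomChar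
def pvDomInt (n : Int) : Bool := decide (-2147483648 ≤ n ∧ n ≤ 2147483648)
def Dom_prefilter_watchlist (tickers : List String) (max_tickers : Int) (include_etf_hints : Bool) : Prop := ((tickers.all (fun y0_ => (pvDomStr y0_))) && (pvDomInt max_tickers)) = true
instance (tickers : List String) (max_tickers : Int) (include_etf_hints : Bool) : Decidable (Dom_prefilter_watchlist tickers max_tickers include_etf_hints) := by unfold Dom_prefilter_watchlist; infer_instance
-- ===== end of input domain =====

-- B fuses A's clean/dedupe/filter/truncate passes into one loop and drops A's dead ETF-hint branch (simpler).

-- ===== PORT A =====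
def pvHints : PySem.Set String :=
  PySem.Set.ofList ["SPY", "QQQ", "IWM", "DIA", "XLK", "XLF", "XLE", "XLV", "XLY", "XLP", "XLI", "XLB", "XLU", "XLC", "XLRE"]

def prefilter_watchlist (tickers : List String) (max_tickers : Int) (include_etf_hints : Bool) : List String :=
  let cleaned := (tickers.filter (fun t => !(t == "") && !(PySem.Str.strip t == ""))).map
    (fun t => PySem.Str.upper (PySem.Str.strip t))
  let deduped := PySem.List.dedup cleaned
  let plain := deduped.filter (fun t => PySem.Str.strIsalpha t && decide (1 ≤ PySem.Str.len t ∧ PySem.Str.len t ≤ 5))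
  let extras := if include_etf_hints then
      deduped.filter (fun t => PySem.Set.contains pvHints t && !(plain.contains t))
    else []
  let merged := plain ++ extras
  if max_tickers > 0 then PySem.List.slice merged none (some max_tickers) else merged

-- ===== PORT B =====
def pvAltGo (max_tickers : Int) : List String → PySem.Set String → List String → List String
  | [], _, result => result
  | t :: rest, seen, result =>
    if t == "" || PySem.Str.strip t == "" then pvAltGo max_tickers rest seen result
    else
      let s := PySem.Str.upper (PySem.Str.strip t)
      if PySem.Set.contains seen s then pvAltGo max_tickers rest seen result
      else
        let seen' := PySem.Set.add seen s
        if PySem.Str.strIsalpha s && decide (1 ≤ PySem.Str.len s ∧ PySem.Str.len s ≤ 5) then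
          let result' := result ++ [s]
          if max_tickers > 0 && ((result'.length : Int) == max_tickers) then result'
          else pvAltGo max_tickers rest seen' result'
        else pvAltGo max_tickers rest seen' result

def prefilter_watchlist_alt (tickers : List String) (max_tickers : Int) (include_etf_hints : Bool) : List String :=
  pvAltGo max_tickers tickers PySem.Set.empty []

-- ===== PRECONDITION & SPEC =====
def Spec_prefilter_watchlist (tickers : List String) (max_tickers : Int) (include_etf_hints : Bool) (out : List String) : Prop := out = prefilter_watchlist_alt tickers max_tickers include_etf_hints
instance (tickers : List String) (max_tickers : Int) (include_etf_hints : Bool) (out : List String) : Decidable (Spec_prefilter_watchlist tickers max_tickers include_etf_hints out) := by unfold Spec_prefilter_watchlist; infer_instance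

-- ===== CLAIM (what is proved, stated in full; the proofs are below) =====
def Claim_equal_prefilter_watchlist : Prop := ∀ (tickers : List String) (max_tickers : Int) (include_etf_hints : Bool), Dom_prefilter_watchlist tickers max_tickers include_etf_hints → Spec_prefilter_watchlist tickers max_tickers include_etf_hints (prefilter_watchlist tickers max_tickers include_etf_hints)

-- ===== LEMMAS AND PROOFS =====

-- the keep predicate shared by both programs
def pvPred (s : String) : Bool :=
  PySem.Str.strIsalpha s && decide (1 ≤ PySem.Str.len s ∧ PySem.Str.len s ≤ 5)

-- the cleaned stream (A's `cleaned`; the values B visits)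
def pvClean (tickers : List String) : List String :=
  (tickers.filter (fun t => !(t == "") && !(PySem.Str.strip t == ""))).map
    (fun t => PySem.Str.upper (PySem.Str.strip t))

-- B without truncation
def pvF : List String → PySem.Set String → List String
  | [], _ => []
  | t :: rest, seen =>
    if t == "" || PySem.Str.strip t == "" then pvF rest seen
    else
      let s := PySem.Str.upper (PySem.Str.strip t)
      if PySem.Set.contains seen s then pvF rest seen
      else if pvPred s then s :: pvF rest (PySem.Set.add seen s)
      else pvF rest (PySem.Set.add seen s)

theorem pvSet_prefix_update (l : List String) (s : PySem.Set String) :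
    s <+: PySem.Set.update s l := by
  induction l generalizing s with
  | nil => simp [PySem.Set.update]
  | cons x xs ih =>
    have h1 : PySem.Set.add s x = s ∨ PySem.Set.add s x = s ++ [x] := by
      unfold PySem.Set.add; split_ifs <;> simp
    have h2 := ih (PySem.Set.add s x)
    have hpre : s <+: PySem.Set.add s x := by
      rcases h1 with h | h <;> simp [h]
    calc s <+: PySem.Set.add s x := hpre
      _ <+: PySem.Set.update (PySem.Set.add s x) xs := h2
      _ = PySem.Set.update s (x :: xs) := by simp [PySem.Set.update, List.foldl]

theorem pvF_eq (ts : List String) (seen : PySem.Set String) :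
    pvF ts seen = ((PySem.Set.update seen (pvClean ts)).drop seen.length).filter pvPred := by
  induction ts generalizing seen with
  | nil => simp [pvF, pvClean, PySem.Set.update]
  | cons t rest ih =>
    by_cases hb : (t == "" || PySem.Str.strip t == "") = true
    · have hblank : ¬(¬t = "" ∧ ¬PySem.Str.strip t = "") := by
        simp only [Bool.or_eq_true, beq_iff_eq] at hb; tauto
      have hclean : pvClean (t :: rest) = pvClean rest := by
        simp [pvClean, hblank]
      simp only [pvF]
      rw [if_pos hb, ih, hclean]
    · have hne : ¬t = "" ∧ ¬PySem.Str.strip t = "" := by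
        simp only [Bool.or_eq_true, beq_iff_eq] at hb; tauto
      have hclean : pvClean (t :: rest) = PySem.Str.upper (PySem.Str.strip t) :: pvClean rest := by
        simp [pvClean, hne.1, hne.2]
      set s := PySem.Str.upper (PySem.Str.strip t) with hs
      have hupd : PySem.Set.update seen (pvClean (t :: rest))
          = PySem.Set.update (PySem.Set.add seen s) (pvClean rest) := by
        rw [hclean]; simp [PySem.Set.update, List.foldl]
      by_cases hc : PySem.Set.contains seen s = true
      · have hadd : PySem.Set.add seen s = seen := by
          unfold PySem.Set.add; rw [if_pos hc]
        simp only [pvF]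
        rw [if_neg hb, if_pos hc, ih, hupd, hadd]
      · have hadd : PySem.Set.add seen s = seen ++ [s] := by
          unfold PySem.Set.add; rw [if_neg hc]
        obtain ⟨tail, htail⟩ := pvSet_prefix_update (pvClean rest) (PySem.Set.add seen s)
        have hdrop1 : (PySem.Set.update (PySem.Set.add seen s) (pvClean rest)).drop seen.length
            = s :: tail := by
          rw [← htail, hadd, List.append_assoc, List.drop_left]; rfl
        have hdrop2 : (PySem.Set.update (PySem.Set.add seen s) (pvClean rest)).drop (PySem.Set.add seen s).length
            = tail := by
          rw [← htail, List.drop_left]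
        have ihr := ih (PySem.Set.add seen s)
        rw [hdrop2] at ihr
        simp only [pvF]
        rw [if_neg hb, if_neg hc, hupd, hdrop1, List.filter_cons]
        by_cases hp : pvPred s = true
        · rw [if_pos hp, if_pos (by simp [hp]), ihr]
        · rw [if_neg hp, if_neg (by simp [hp]), ihr]

theorem pvAltGo_eq (m : Int) (ts : List String) (seen : PySem.Set String) (result : List String)
    (hinv : m > 0 → (result.length : Int) < m) :
    pvAltGo m ts seen result
      = result ++ (if m > 0 then (pvF ts seen).take (m.toNat - result.length) else pvF ts seen) := by
  induction ts generalizing seen result with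
  | nil => simp [pvAltGo, pvF]
  | cons t rest ih =>
    by_cases hb : (t == "" || PySem.Str.strip t == "") = true
    · simp only [pvAltGo, pvF]
      rw [if_pos hb, if_pos hb]
      exact ih seen result hinv
    · set s := PySem.Str.upper (PySem.Str.strip t) with hs
      by_cases hc : PySem.Set.contains seen s = true
      · simp only [pvAltGo, pvF]
        rw [if_neg hb, if_neg hb, if_pos hc, if_pos hc]
        exact ih seen result hinv
      · by_cases hp : pvPred s = true
        · have hpred : (PySem.Str.strIsalpha s && decide (1 ≤ PySem.Str.len s ∧ PySem.Str.len s ≤ 5)) = true := hp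
          simp only [pvAltGo, pvF]
          rw [if_neg hb, if_neg hb, if_neg hc, if_neg hc, if_pos hpred, if_pos hp]
          by_cases hstop : (decide (m > 0) && (((result ++ [s]).length : Int) == m)) = true
          · rw [if_pos hstop]
            have hm : m > 0 := by simp at hstop; exact hstop.1
            have hlen : ((result.length : Int) + 1) = m := by
              simp only [Bool.and_eq_true, beq_iff_eq, decide_eq_true_eq,
                List.length_append, List.length_cons, List.length_nil] at hstop
              push_cast at hstop ⊢; omega
            have htake : m.toNat - result.length = 1 := by omega
            rw [if_pos hm, htake]
            simp
          · rw [if_neg hstop]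
            by_cases hm : m > 0
            · have hne : ((result.length : Int) + 1) ≠ m := by
                intro h
                apply hstop
                simp only [Bool.and_eq_true, beq_iff_eq, decide_eq_true_eq]
                constructor
                · exact hm
                · simp only [List.length_append, List.length_cons, List.length_nil]
                  push_cast; omega
              have hlt := hinv hm
              have hinv2 : m > 0 → (((result ++ [s]).length : Int)) < m := by
                intro _
                simp only [List.length_append, List.length_cons, List.length_nil]
                push_cast; omega
              rw [ih (PySem.Set.add seen s) (result ++ [s]) hinv2]
              have hk : m.toNat - result.length = (m.toNat - (result ++ [s]).length) + 1 := by
                simp only [List.length_append, List.length_cons, List.length_nil]; omega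
              rw [if_pos hm, if_pos hm, hk, List.take_succ_cons]
              simp only [List.append_assoc, List.singleton_append]
              rw [← hs]
            · have hinv2 : m > 0 → (((result ++ [s]).length : Int)) < m := fun h => absurd h hm
              rw [ih (PySem.Set.add seen s) (result ++ [s]) hinv2]
              rw [if_neg hm, if_neg hm]
              simp only [List.append_assoc, List.singleton_append]
              rw [← hs]
        · have hnp : ¬((PySem.Str.strIsalpha s && decide (1 ≤ PySem.Str.len s ∧ PySem.Str.len s ≤ 5)) = true) := hp
          simp only [pvAltGo, pvF]
          rw [if_neg hb, if_neg hb, if_neg hc, if_neg hc, if_neg hnp, if_neg hp]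
          exact ih (PySem.Set.add seen s) result hinv

-- every ETF hint already passes the plain filter, so A's `extras` is empty
set_option maxHeartbeats 1000000 in
theorem pvHints_pred : ∀ t ∈ pvHints, pvPred t = true := by decide

theorem pvExtras_nil (deduped : List String) :
    deduped.filter (fun t => PySem.Set.contains pvHints t && !((deduped.filter pvPred).contains t)) = [] := by
  rw [List.filter_eq_nil_iff]
  intro t ht
  simp
  intro hmem
  exact ⟨ht, pvHints_pred t hmem⟩

-- ===== VERDICT (by name: the statement is the Claim_ definition above) =====
theorem prefilter_watchlist_spec : Claim_equal_prefilter_watchlist := by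
  intro tickers m inc _
  show prefilter_watchlist tickers m inc = prefilter_watchlist_alt tickers m inc
  unfold prefilter_watchlist prefilter_watchlist_alt
  rw [pvAltGo_eq m tickers PySem.Set.empty [] (fun h => by simpa using h)]
  rw [pvF_eq]
  have hupd : PySem.Set.update PySem.Set.empty (pvClean tickers) = PySem.List.dedup (pvClean tickers) := by
    rw [PySem.Set.update_empty]; simp
  rw [hupd]
  simp only [PySem.Set.empty, List.length_nil, List.drop_zero, List.nil_append, Nat.sub_zero]
  have hextras : (if inc then
      (PySem.List.dedup (pvClean tickers)).filter
        (fun t => PySem.Set.contains pvHints t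
          && !(((PySem.List.dedup (pvClean tickers)).filter
                (fun t => PySem.Str.strIsalpha t && decide (1 ≤ PySem.Str.len t ∧ PySem.Str.len t ≤ 5))).contains t))
    else []) = [] := by
    split_ifs
    · exact pvExtras_nil (PySem.List.dedup (pvClean tickers))
    · rfl
  show (let merged := _ ++ _; if m > 0 then PySem.List.slice merged none (some m) else merged) = _
  simp only [pvClean] at *
  rw [hextras, List.append_nil]
  by_cases hm : m > 0
  · rw [if_pos hm, if_pos hm, PySem.List.slice_to _ (le_of_lt hm)]
    rfl
  · rw [if_neg hm, if_neg hm]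
    rfl
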